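-- pv_equiv track=rewrite | github.com/shivamskr151/gcp_bill_dash | gcp_billing_exporter.py | format_prometheus_metrics
-- ===== SOURCE A (Python) =====
-- def format_prometheus_metrics(metrics_list):
--     """Format metrics list with proper Prometheus format"""
--     # Add help and type declarations if not present
--     formatted = []
--
--     # Add standard headers
--     if not any("# HELP gcp_billing_cost" in m for m in metrics_list):
--         formatted.append("# HELP gcp_billing_cost Billing cost in USD")
--         formatted.append("# TYPE gcp_billing_cost gauge")
--
--     if not any("# HELP gcp_billing_cost_total" in m for m in metrics_list):
--         formatted.append("# HELP gcp_billing_cost_total Total billing cost in USD")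
--         formatted.append("# TYPE gcp_billing_cost_total gauge")
--
--     if not any("# HELP gcp_billing_cost_daily_by_service" in m for m in metrics_list) and any("gcp_billing_cost_daily_by_service" in m for m in metrics_list):
--         formatted.append("# HELP gcp_billing_cost_daily_by_service Daily billing cost per service (by date)")
--         formatted.append("# TYPE gcp_billing_cost_daily_by_service gauge")
--
--     if not any("# HELP gcp_billing_cost_instance_daily" in m for m in metrics_list) and any("gcp_billing_cost_instance_daily" in m for m in metrics_list):
--         formatted.append("# HELP gcp_billing_cost_instance_daily Daily billing cost per VM instance")
--         formatted.append("# TYPE gcp_billing_cost_instance_daily gauge")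
--
--
--     formatted.extend(metrics_list)
--     return "\n".join(formatted) + "\n"
-- ===== SOURCE B (Python) =====
-- SUBS = (
--     "# HELP gcp_billing_cost",
--     "# HELP gcp_billing_cost_total",
--     "# HELP gcp_billing_cost_daily_by_service",
--     "gcp_billing_cost_daily_by_service",
--     "# HELP gcp_billing_cost_instance_daily",
--     "gcp_billing_cost_instance_daily",
-- )
--
-- def format_prometheus_metrics(metrics_list):
--     """Format metrics list with proper Prometheus format (single scan for all flags)"""
--     seen = {s: False for s in SUBS}
--     for m in metrics_list:
--         for s in SUBS:
--             if not seen[s] and s in m: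
--                 seen[s] = True
--     headers = []
--     if not seen["# HELP gcp_billing_cost"]:
--         headers.append("# HELP gcp_billing_cost Billing cost in USD")
--         headers.append("# TYPE gcp_billing_cost gauge")
--     if not seen["# HELP gcp_billing_cost_total"]:
--         headers.append("# HELP gcp_billing_cost_total Total billing cost in USD")
--         headers.append("# TYPE gcp_billing_cost_total gauge")
--     if not seen["# HELP gcp_billing_cost_daily_by_service"] and seen["gcp_billing_cost_daily_by_service"]:
--         headers.append("# HELP gcp_billing_cost_daily_by_service Daily billing cost per service (by date)")
--         headers.append("# TYPE gcp_billing_cost_daily_by_service gauge")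
--     if not seen["# HELP gcp_billing_cost_instance_daily"] and seen["gcp_billing_cost_instance_daily"]:
--         headers.append("# HELP gcp_billing_cost_instance_daily Daily billing cost per VM instance")
--         headers.append("# TYPE gcp_billing_cost_instance_daily gauge")
--     return "\n".join(headers + metrics_list) + "\n"
-- ===== Notes on version B (the rewrite author's own statement) =====
-- stated objective: alternative
-- what changed: Replaces A's six separate any(...) scans of metrics_list with a single pass that builds a flag table (dict of substring -> seen) and then emits the same headers from the flags.
import Mathlib
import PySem

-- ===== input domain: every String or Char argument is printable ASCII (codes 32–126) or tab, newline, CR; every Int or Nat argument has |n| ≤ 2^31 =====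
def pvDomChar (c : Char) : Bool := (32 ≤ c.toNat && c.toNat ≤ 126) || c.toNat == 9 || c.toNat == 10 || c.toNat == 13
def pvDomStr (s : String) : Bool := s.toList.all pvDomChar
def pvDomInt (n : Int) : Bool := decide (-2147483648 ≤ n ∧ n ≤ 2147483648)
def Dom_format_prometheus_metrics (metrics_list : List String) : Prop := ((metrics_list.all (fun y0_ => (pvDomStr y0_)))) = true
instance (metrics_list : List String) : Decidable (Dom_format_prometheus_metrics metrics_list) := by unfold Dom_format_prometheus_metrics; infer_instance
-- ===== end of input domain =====

-- B replaces A's six separate any(...) scans with one pass building a flag table, then emits the same headers (objective: alternative).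

-- ===== PORT A =====
def format_prometheus_metrics (metrics_list : List String) : String :=
  let formatted : List String := []
  let formatted :=
    if !(metrics_list.any (fun m => PySem.Str.isIn "# HELP gcp_billing_cost" m)) then
      formatted ++ ["# HELP gcp_billing_cost Billing cost in USD", "# TYPE gcp_billing_cost gauge"]
    else formatted
  let formatted :=
    if !(metrics_list.any (fun m => PySem.Str.isIn "# HELP gcp_billing_cost_total" m)) then
      formatted ++ ["# HELP gcp_billing_cost_total Total billing cost in USD", "# TYPE gcp_billing_cost_total gauge"]
    else formatted
  let formatted :=
    if !(metrics_list.any (fun m => PySem.Str.isIn "# HELP gcp_billing_cost_daily_by_service" m))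
        && metrics_list.any (fun m => PySem.Str.isIn "gcp_billing_cost_daily_by_service" m) then
      formatted ++ ["# HELP gcp_billing_cost_daily_by_service Daily billing cost per service (by date)", "# TYPE gcp_billing_cost_daily_by_service gauge"]
    else formatted
  let formatted :=
    if !(metrics_list.any (fun m => PySem.Str.isIn "# HELP gcp_billing_cost_instance_daily" m))
        && metrics_list.any (fun m => PySem.Str.isIn "gcp_billing_cost_instance_daily" m) then
      formatted ++ ["# HELP gcp_billing_cost_instance_daily Daily billing cost per VM instance", "# TYPE gcp_billing_cost_instance_daily gauge"]
    else formatted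
  let formatted := formatted ++ metrics_list
  PySem.Str.join "\n" formatted ++ "\n"

-- ===== PORT B =====
-- 'if not seen[s] and s in m: seen[s] = True' for one flag
def pvStep (b : Bool) (s m : String) : Bool :=
  if !b && PySem.Str.isIn s m then true else b

-- the flag table: one fold over metrics_list updating all six flags
def pvFlags (metrics_list : List String) : Bool × Bool × Bool × Bool × Bool × Bool :=
  metrics_list.foldl
    (fun seen m =>
      (pvStep seen.1 "# HELP gcp_billing_cost" m,
       pvStep seen.2.1 "# HELP gcp_billing_cost_total" m,
       pvStep seen.2.2.1 "# HELP gcp_billing_cost_daily_by_service" m,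
       pvStep seen.2.2.2.1 "gcp_billing_cost_daily_by_service" m,
       pvStep seen.2.2.2.2.1 "# HELP gcp_billing_cost_instance_daily" m,
       pvStep seen.2.2.2.2.2 "gcp_billing_cost_instance_daily" m))
    (false, false, false, false, false, false)

def format_prometheus_metrics_alt (metrics_list : List String) : String :=
  let seen := pvFlags metrics_list
  let headers : List String := []
  let headers :=
    if !seen.1 then
      headers ++ ["# HELP gcp_billing_cost Billing cost in USD", "# TYPE gcp_billing_cost gauge"]
    else headers
  let headers :=
    if !seen.2.1 then
      headers ++ ["# HELP gcp_billing_cost_total Total billing cost in USD", "# TYPE gcp_billing_cost_total gauge"]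
    else headers
  let headers :=
    if !seen.2.2.1 && seen.2.2.2.1 then
      headers ++ ["# HELP gcp_billing_cost_daily_by_service Daily billing cost per service (by date)", "# TYPE gcp_billing_cost_daily_by_service gauge"]
    else headers
  let headers :=
    if !seen.2.2.2.2.1 && seen.2.2.2.2.2 then
      headers ++ ["# HELP gcp_billing_cost_instance_daily Daily billing cost per VM instance", "# TYPE gcp_billing_cost_instance_daily gauge"]
    else headers
  PySem.Str.join "\n" (headers ++ metrics_list) ++ "\n"

-- ===== PRECONDITION & SPEC =====
def Spec_format_prometheus_metrics (metrics_list : List String) (out : String) : Prop := out = format_prometheus_metrics_alt metrics_list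
instance (metrics_list : List String) (out : String) : Decidable (Spec_format_prometheus_metrics metrics_list out) := by unfold Spec_format_prometheus_metrics; infer_instance

-- ===== CLAIM (what is proved, stated in full; the proofs are below) =====
def Claim_equal_format_prometheus_metrics : Prop := ∀ (metrics_list : List String), Dom_format_prometheus_metrics metrics_list → Spec_format_prometheus_metrics metrics_list (format_prometheus_metrics metrics_list)

-- ===== LEMMAS AND PROOFS =====
theorem pvStep_eq (b : Bool) (s m : String) : pvStep b s m = (b || PySem.Str.isIn s m) := by
  cases b <;> simp [pvStep]

theorem pvFlags_eq (l : List String) :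
    pvFlags l =
      (l.any (fun m => PySem.Str.isIn "# HELP gcp_billing_cost" m),
       l.any (fun m => PySem.Str.isIn "# HELP gcp_billing_cost_total" m),
       l.any (fun m => PySem.Str.isIn "# HELP gcp_billing_cost_daily_by_service" m),
       l.any (fun m => PySem.Str.isIn "gcp_billing_cost_daily_by_service" m),
       l.any (fun m => PySem.Str.isIn "# HELP gcp_billing_cost_instance_daily" m),
       l.any (fun m => PySem.Str.isIn "gcp_billing_cost_instance_daily" m)) := by
  suffices h : ∀ (l : List String) (b1 b2 b3 b4 b5 b6 : Bool),
      l.foldl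
        (fun seen m =>
          (pvStep seen.1 "# HELP gcp_billing_cost" m,
           pvStep seen.2.1 "# HELP gcp_billing_cost_total" m,
           pvStep seen.2.2.1 "# HELP gcp_billing_cost_daily_by_service" m,
           pvStep seen.2.2.2.1 "gcp_billing_cost_daily_by_service" m,
           pvStep seen.2.2.2.2.1 "# HELP gcp_billing_cost_instance_daily" m,
           pvStep seen.2.2.2.2.2 "gcp_billing_cost_instance_daily" m))
        (b1, b2, b3, b4, b5, b6) =
      ((b1 || l.any (fun m => PySem.Str.isIn "# HELP gcp_billing_cost" m)),
       (b2 || l.any (fun m => PySem.Str.isIn "# HELP gcp_billing_cost_total" m)),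
       (b3 || l.any (fun m => PySem.Str.isIn "# HELP gcp_billing_cost_daily_by_service" m)),
       (b4 || l.any (fun m => PySem.Str.isIn "gcp_billing_cost_daily_by_service" m)),
       (b5 || l.any (fun m => PySem.Str.isIn "# HELP gcp_billing_cost_instance_daily" m)),
       (b6 || l.any (fun m => PySem.Str.isIn "gcp_billing_cost_instance_daily" m))) by
    simpa using h l false false false false false false
  intro l
  induction l with
  | nil => intro b1 b2 b3 b4 b5 b6; simp
  | cons x xs ih =>
      intro b1 b2 b3 b4 b5 b6
      rw [List.foldl_cons, ih]
      simp [pvStep_eq, Bool.or_assoc]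

-- ===== VERDICT (by name: the statement is the Claim_ definition above) =====
theorem format_prometheus_metrics_spec : Claim_equal_format_prometheus_metrics := by
  intro metrics_list _
  unfold Spec_format_prometheus_metrics
  simp only [format_prometheus_metrics, format_prometheus_metrics_alt, pvFlags_eq]
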